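-- pv_equiv track=rewrite | github.com/LliliLlooping/CMU_02604BioinformaticsAlgorithms | Week3/SpectralConvolution.py | SpectralConvolution
-- ===== SOURCE A (Python) =====
-- def SpectralConvolution(spectrum):
--     """
--         Input: A collection of integers Spectrum.
--         Output: The list of elements in the convolution of Spectrum.
--                 If an element has multiplicity k, it should appear exactly k times; you may return the elements in any order.
--     """
--     # Sort the spectrum in ascending order
--     spectrum = sorted(spectrum)
--
--     # Get the number of intergers in the input spectrum
--     lengthSpectrum = len(spectrum)
--
--     # Every element subtract the elements on its left
--     result = [spectrum[j] - spectrum[i]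
--               for i in range(lengthSpectrum - 1) for j in range(i+1, lengthSpectrum)]
--
--     # Remove zeros from the result
--     while 0 in result:
--         result.remove(0)
--
--     return sorted(result)
-- ===== SOURCE B (Python) =====
-- def SpectralConvolution(spectrum):
--     # One pass over structural pairs of the unsorted input: absolute differences,
--     # zeros skipped as they are produced; sort only the result once.
--     diffs = []
--     rest = spectrum
--     while rest:
--         x, rest = rest[0], rest[1:]
--         for y in rest:
--             d = abs(x - y)
--             if d != 0:
--                 diffs.append(d)
--     return sorted(diffs)
-- ===== Notes on version B (the rewrite author's own statement) =====
-- stated objective: faster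
-- what changed: B drops the pre-sort, the index double loop and the repeated 'while 0 in result: result.remove(0)' scans: it walks structural pairs of the unsorted input once, taking abs(x-y) and skipping zeros as they are produced, then sorts the result list once.
import Mathlib
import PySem

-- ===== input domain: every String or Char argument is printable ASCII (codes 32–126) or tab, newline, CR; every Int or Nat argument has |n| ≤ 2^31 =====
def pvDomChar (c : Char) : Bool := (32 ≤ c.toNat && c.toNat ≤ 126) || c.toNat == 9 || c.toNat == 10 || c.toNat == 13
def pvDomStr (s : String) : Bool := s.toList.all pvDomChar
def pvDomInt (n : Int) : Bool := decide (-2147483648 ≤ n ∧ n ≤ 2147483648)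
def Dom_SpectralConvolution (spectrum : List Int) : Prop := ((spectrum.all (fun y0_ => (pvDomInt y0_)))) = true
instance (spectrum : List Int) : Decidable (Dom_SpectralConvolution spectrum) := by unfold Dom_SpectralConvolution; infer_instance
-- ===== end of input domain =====

-- B drops A's pre-sort, index double loop and repeated remove(0) scans: one structural-pair pass
-- over the unsorted input with abs and an inline zero skip, sorting only the result (simpler).


-- ===== PORT A =====
-- 'while 0 in result: result.remove(0)' — remove the first 0 while one is present
def pyWhileRemoveZero (l : List Int) : List Int :=
  if h : (0 : Int) ∈ l then
    pyWhileRemoveZero ((PySem.List.remove? l 0).getD l)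
  else l
termination_by l.length
decreasing_by
  rw [PySem.List.remove?_eq_some_erase l 0 h, Option.getD_some]
  have h1 := List.length_erase_of_mem h
  have h2 := List.length_pos_of_mem h
  omega

def SpectralConvolution (spectrum : List Int) : List Int :=
  -- spectrum = sorted(spectrum)
  let s := PySem.List.sorted spectrum (fun x => x) false
  -- lengthSpectrum = len(spectrum)
  let n : Int := s.length
  -- result = [spectrum[j] - spectrum[i] for i in range(n-1) for j in range(i+1, n)]
  let result := (PySem.List.pyRange 0 (n - 1) 1).flatMap (fun i =>
    (PySem.List.pyRange (i + 1) n 1).map (fun j =>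
      PySem.List.pyGetD s j 0 - PySem.List.pyGetD s i 0))
  -- while 0 in result: result.remove(0);  return sorted(result)
  PySem.List.sorted (pyWhileRemoveZero result) (fun x => x) false

-- ===== PORT B =====
-- the while loop of Source B: peel off the head x, append the nonzero |x - y| for the remaining y
def altLoop (diffs : List Int) : List Int → List Int
  | [] => diffs
  | x :: rest =>
      altLoop (rest.foldl (fun acc y => if |x - y| ≠ 0 then acc ++ [|x - y|] else acc) diffs) rest

def SpectralConvolution_alt (spectrum : List Int) : List Int :=
  PySem.List.sorted (altLoop [] spectrum) (fun x => x) false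

-- ===== PRECONDITION & SPEC =====
def Spec_SpectralConvolution (spectrum : List Int) (out : List Int) : Prop := out = SpectralConvolution_alt spectrum
instance (spectrum : List Int) (out : List Int) : Decidable (Spec_SpectralConvolution spectrum out) := by unfold Spec_SpectralConvolution; infer_instance

-- ===== CLAIM (what is proved, stated in full; the proofs are below) =====
def Claim_equal_SpectralConvolution : Prop := ∀ (spectrum : List Int), Dom_SpectralConvolution spectrum → Spec_SpectralConvolution spectrum (SpectralConvolution spectrum)

-- ===== LEMMAS AND PROOFS =====

-- structural pairwise differences (later minus earlier), the content of A's index loops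
def subPairs : List Int → List Int
  | [] => []
  | x :: r => r.map (fun y => y - x) ++ subPairs r

-- structural pairwise absolute differences, the content of B's loop
def absPairs : List Int → List Int
  | [] => []
  | x :: r => r.map (fun y => |x - y|) ++ absPairs r

theorem filter_ne_erase_zero : ∀ l : List Int,
    (l.erase 0).filter (fun x => x ≠ 0) = l.filter (fun x => x ≠ 0)
  | [] => rfl
  | a :: l => by
    by_cases h : a = 0
    · subst h
      rw [List.erase_cons_head, List.filter_cons]
      simp
    · rw [List.erase_cons_tail (by simp [h]), List.filter_cons, List.filter_cons,
          filter_ne_erase_zero l]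

theorem pyWhileRemoveZero_eq_filter (l : List Int) :
    pyWhileRemoveZero l = l.filter (fun x => x ≠ 0) := by
  rw [pyWhileRemoveZero]
  by_cases h : (0 : Int) ∈ l
  · rw [dif_pos h, PySem.List.remove?_eq_some_erase l 0 h, Option.getD_some,
        pyWhileRemoveZero_eq_filter (l.erase 0), filter_ne_erase_zero]
  · rw [dif_neg h]
    symm
    apply List.filter_eq_self.mpr
    intro x hx
    simp only [ne_eq, decide_eq_true_eq]
    exact fun e => h (e ▸ hx)
termination_by l.length
decreasing_by
  have h1 := List.length_erase_of_mem h
  have h2 := List.length_pos_of_mem h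
  omega

theorem drop_pairs_eq_subPairs : ∀ s : List Int,
    (List.range (s.length - 1)).flatMap
      (fun k => (s.drop (k + 1)).map (fun y => y - s.getD k 0)) = subPairs s
  | [] => rfl
  | x :: r => by
    match r with
    | [] => rfl
    | y :: t =>
      rw [show (x :: y :: t : List Int).length - 1 = t.length + 1 from rfl,
          List.range_succ_eq_map, List.flatMap_cons, List.flatMap_map]
      have h2 : ∀ k, ((x :: y :: t).drop (Nat.succ k + 1)).map
            (fun z => z - (x :: y :: t).getD (Nat.succ k) 0)
          = ((y :: t).drop (k + 1)).map (fun z => z - (y :: t).getD k 0) := by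
        intro k; rfl
      calc ((x :: y :: t).drop 1).map (fun z => z - (x :: y :: t).getD 0 0)
              ++ (List.range t.length).flatMap (fun k =>
                ((x :: y :: t).drop (Nat.succ k + 1)).map (fun z => z - (x :: y :: t).getD (Nat.succ k) 0))
            = (y :: t).map (fun z => z - x)
              ++ (List.range ((y :: t).length - 1)).flatMap (fun k =>
                ((y :: t).drop (k + 1)).map (fun z => z - (y :: t).getD k 0)) := by
              simp only [h2]; rfl
        _ = subPairs (x :: y :: t) := by
              rw [drop_pairs_eq_subPairs (y :: t)]; rfl

theorem index_pairs_eq_subPairs (s : List Int) :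
    (PySem.List.pyRange 0 ((s.length : Int) - 1) 1).flatMap (fun i =>
      (PySem.List.pyRange (i + 1) (s.length : Int) 1).map (fun j =>
        PySem.List.pyGetD s j 0 - PySem.List.pyGetD s i 0)) = subPairs s := by
  rw [← drop_pairs_eq_subPairs s]
  rw [PySem.List.pyRange_one 0 ((s.length : Int) - 1), List.flatMap_map,
      show (((s.length : Int) - 1) - 0).toNat = s.length - 1 from by omega]
  congr 1
  funext k
  have hmap : (PySem.List.pyRange ((0 + (k : Int)) + 1) (s.length : Int) 1).map
        (fun j => PySem.List.pyGetD s j 0)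
      = s.drop ((0 + (k : Int)) + 1).toNat :=
    PySem.List.map_pyGetD_pyRange' s 0 (by omega)
  calc (PySem.List.pyRange ((0 + (k : Int)) + 1) (s.length : Int) 1).map
          (fun j => PySem.List.pyGetD s j 0 - PySem.List.pyGetD s (0 + (k : Int)) 0)
      = ((PySem.List.pyRange ((0 + (k : Int)) + 1) (s.length : Int) 1).map
          (fun j => PySem.List.pyGetD s j 0)).map
            (fun v => v - PySem.List.pyGetD s (0 + (k : Int)) 0) := by
        rw [List.map_map]; rfl
    _ = (s.drop (k + 1)).map (fun y => y - s.getD k 0) := by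
        rw [hmap]
        have h1 : ((0 + (k : Int)) + 1).toNat = k + 1 := by omega
        have h2 : (0 + (k : Int)) = ((k : Nat) : Int) := by omega
        rw [h1, h2, PySem.List.pyGetD_natCast]

theorem subPairs_eq_absPairs_of_sorted : ∀ s : List Int,
    s.Pairwise (· ≤ ·) → subPairs s = absPairs s
  | [] => fun _ => rfl
  | x :: r => by
    intro h
    rw [List.pairwise_cons] at h
    show r.map (fun y => y - x) ++ subPairs r = r.map (fun y => |x - y|) ++ absPairs r
    rw [subPairs_eq_absPairs_of_sorted r h.2]
    congr 1
    apply List.map_congr_left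
    intro y hy
    rw [abs_sub_comm, abs_of_nonneg (sub_nonneg.mpr (h.1 y hy))]

theorem absPairs_perm {l l' : List Int} (h : l.Perm l') : (absPairs l).Perm (absPairs l') := by
  induction h with
  | nil => exact List.Perm.refl _
  | cons a h ih => exact List.Perm.append (h.map _) ih
  | swap x y t =>
    show ((x :: t).map (fun z => |y - z|) ++ (t.map (fun z => |x - z|) ++ absPairs t)).Perm
         ((y :: t).map (fun z => |x - z|) ++ (t.map (fun z => |y - z|) ++ absPairs t))
    simp only [List.map_cons, List.cons_append]
    rw [abs_sub_comm y x]
    refine List.Perm.cons _ ?_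
    rw [← List.append_assoc, ← List.append_assoc]
    exact List.Perm.append_right _ List.perm_append_comm
  | trans _ _ ih1 ih2 => exact ih1.trans ih2

theorem altLoop_eq : ∀ (l diffs : List Int),
    altLoop diffs l = diffs ++ (absPairs l).filter (fun x => x ≠ 0)
  | [], diffs => by simp [altLoop, absPairs]
  | x :: r, diffs => by
    rw [show altLoop diffs (x :: r)
        = altLoop (r.foldl (fun acc y => if |x - y| ≠ 0 then acc ++ [|x - y|] else acc) diffs) r
        from rfl,
      PySem.List.foldl_append_ite (fun y => |x - y| ≠ 0) (fun y => |x - y|) r diffs,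
      altLoop_eq r]
    show diffs ++ _ ++ _ = diffs ++ (absPairs (x :: r)).filter (fun x => x ≠ 0)
    rw [show absPairs (x :: r) = r.map (fun y => |x - y|) ++ absPairs r from rfl,
        List.filter_append, List.append_assoc]
    congr 2
    rw [List.filter_map]
    rfl

-- ===== VERDICT (by name: the statement is the Claim_ definition above) =====
theorem SpectralConvolution_spec : Claim_equal_SpectralConvolution := by
  intro spectrum _
  show SpectralConvolution spectrum = SpectralConvolution_alt spectrum
  show PySem.List.sorted (pyWhileRemoveZero
      ((PySem.List.pyRange 0 (((PySem.List.sorted spectrum (fun x => x) false).length : Int) - 1) 1).flatMap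
        (fun i => (PySem.List.pyRange (i + 1) ((PySem.List.sorted spectrum (fun x => x) false).length : Int) 1).map
          (fun j => PySem.List.pyGetD (PySem.List.sorted spectrum (fun x => x) false) j 0
            - PySem.List.pyGetD (PySem.List.sorted spectrum (fun x => x) false) i 0))))
      (fun x => x) false
    = PySem.List.sorted (altLoop [] spectrum) (fun x => x) false
  rw [index_pairs_eq_subPairs, pyWhileRemoveZero_eq_filter,
      subPairs_eq_absPairs_of_sorted _ (PySem.List.sorted_pairwise spectrum (fun x => x)),
      altLoop_eq]
  simp only [List.nil_append]
  exact PySem.List.sorted_eq_sorted_of_perm _ _ _ (fun a b h => h)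
    ((absPairs_perm (PySem.List.sorted_perm spectrum (fun x => x) false)).filter _)
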